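-- pv_equiv track=rewrite | github.com/alacrity2001/PTSA-public- | ptsa/ptsa/other/normats/norma.py | convert_zero
-- ===== SOURCE A (Python) =====
-- def convert_zero(ts):
-- 	data = ts.copy()
-- 	for i in range(len(ts)):
-- 		j = 0
-- 		while data[i] == 0:
-- 			if i+j < len(ts):
-- 				data[i] = ts[i+j]
-- 			else:
-- 				data[i] = ts[i-1]
-- 			j+= 1
--
-- 	return data
-- ===== SOURCE B (Python) =====
-- def convert_zero(ts):
--     # Single right-to-left pass: carry the nearest non-zero value to the right;
--     # a zero with no non-zero to its right falls back to ts[i - 1].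
--     n = len(ts)
--     out = []
--     nxt = None
--     for i in range(n - 1, -1, -1):
--         v = ts[i]
--         if v != 0:
--             nxt = v
--             out.append(v)
--         elif nxt is not None:
--             out.append(nxt)
--         else:
--             out.append(ts[i - 1])
--     out.reverse()
--     return out
-- ===== Notes on version B (the rewrite author's own statement) =====
-- stated objective: alternative
-- what changed: replaces the per-index rightward while-scan with a single right-to-left pass that carries the nearest non-zero value to the right, falling back to ts[i-1] only when no non-zero lies to the right; Pre_ excludes exactly the inputs (last element 0 with the one before it absent or 0) on which A's while loop never terminates
-- outside the precondition, e.g. on convert_zero([1, 0, 0]): A does not finish within the time limit, B returns [1, 1, 0]; on convert_zero([0]): A does not finish within the time limit, B returns [0]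
import Mathlib
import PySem

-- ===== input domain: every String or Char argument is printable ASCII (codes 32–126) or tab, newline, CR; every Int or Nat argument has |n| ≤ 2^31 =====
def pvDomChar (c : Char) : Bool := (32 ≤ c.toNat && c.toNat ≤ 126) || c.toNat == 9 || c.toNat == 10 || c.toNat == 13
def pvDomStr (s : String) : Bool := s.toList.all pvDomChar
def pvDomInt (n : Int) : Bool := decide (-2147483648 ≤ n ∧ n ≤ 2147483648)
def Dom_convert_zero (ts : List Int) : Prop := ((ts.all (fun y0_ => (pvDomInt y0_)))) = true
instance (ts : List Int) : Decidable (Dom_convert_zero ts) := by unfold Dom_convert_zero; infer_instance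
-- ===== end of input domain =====

-- B replaces A's per-index rightward while-scan by one right-to-left pass that carries the
-- nearest non-zero value to the right; same return value on every input where A returns.

-- ===== PORT A =====
-- A's inner `while data[i] == 0` loop: only cell i is read/written there, carried as `cur`.
-- The while loop does not terminate on every input (Pre_ excludes exactly those inputs);
-- `fuel` only bounds the recursion and is never exhausted on inputs satisfying Pre_.
def cellA (ts : List Int) (i : Nat) (cur : Int) (j : Nat) : Nat → Int
  | 0 => cur
  | fuel + 1 =>
    if cur = 0 then
      let cur' := if i + j < ts.length
        then (PySem.List.pyGet? ts ((i + j : Nat) : Int)).getD 0   -- data[i] = ts[i+j] (index in range)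
        else (PySem.List.pyGet? ts ((i : Int) - 1)).getD 0         -- data[i] = ts[i-1]
      cellA ts i cur' (j + 1) fuel
    else cur

-- `for i in range(len(ts)): …`, updating data (initially ts.copy()) in place at index i.
def convert_zero (ts : List Int) : List Int :=
  (List.range ts.length).foldl
    (fun data i => data.set i (cellA ts i (data.getD i 0) 0 (ts.length + 2))) ts

-- ===== PORT B =====
-- B's right-to-left loop as recursion on the list: returns (transformed suffix, nxt), where
-- nxt is the nearest non-zero value in the suffix (None if the suffix is all zero).
def goB (ts : List Int) : Nat → List Int → List Int × Option Int
  | _, [] => ([], none)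
  | i, x :: rest =>
    let r := goB ts (i + 1) rest
    if x ≠ 0 then (x :: r.1, some x)
    else
      match r.2 with
      | some v => (v :: r.1, some v)
      | none => ((PySem.List.pyGet? ts ((i : Int) - 1)).getD 0 :: r.1, none)   -- ts[i - 1]

def convert_zero_alt (ts : List Int) : List Int := (goB ts 0 ts).1

-- ===== PRECONDITION & SPEC =====
-- Pre_ excludes exactly the inputs on which A's while loop never terminates (A diverges and
-- returns nothing): lists whose last element is 0 while the element before it is absent or
-- also 0.
def Pre_convert_zero (ts : List Int) : Prop :=
  ts.getLast? ≠ some 0 ∨ (2 ≤ ts.length ∧ ts.getD (ts.length - 2) 0 ≠ 0)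
instance (ts : List Int) : Decidable (Pre_convert_zero ts) := by
  unfold Pre_convert_zero; infer_instance

def pvWitness_convert_zero : List Int := [0, 5, 0]

def Spec_convert_zero (ts : List Int) (out : List Int) : Prop := out = convert_zero_alt ts
instance (ts : List Int) (out : List Int) : Decidable (Spec_convert_zero ts out) := by
  unfold Spec_convert_zero; infer_instance

-- ===== CLAIM (what is proved, stated in full; the proofs are below) =====
def Claim_equal_convert_zero : Prop :=
  ∀ (ts : List Int), Dom_convert_zero ts → Pre_convert_zero ts →
    Spec_convert_zero ts (convert_zero ts)

-- ===== LEMMAS AND PROOFS =====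

-- the common value of both programs at index k (scanning l = the suffix of ts from i)
def valF_at (ts : List Int) (i : Nat) (l : List Int) (k : Nat) : Int :=
  match (l.drop k).find? (fun x => x != 0) with
  | some v => v
  | none => (PySem.List.pyGet? ts (((i + k : Nat) : Int) - 1)).getD 0

theorem goB_eq (ts : List Int) :
    ∀ (l : List Int) (i : Nat),
      goB ts i l
        = ((List.range l.length).map (fun k => valF_at ts i l k), l.find? (fun x => x != 0)) := by
  intro l
  induction l with
  | nil => intro i; simp [goB, valF_at]
  | cons x rest ih =>
    intro i
    have htail : ∀ k, valF_at ts i (x :: rest) (k + 1) = valF_at ts (i + 1) rest k := by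
      intro k
      simp only [valF_at, List.drop_succ_cons]
      rw [show i + (k + 1) = i + 1 + k from by omega]
    have hmap : (List.range (x :: rest).length).map (fun k => valF_at ts i (x :: rest) k)
        = valF_at ts i (x :: rest) 0
          :: (List.range rest.length).map (fun k => valF_at ts (i + 1) rest k) := by
      rw [List.length_cons, List.range_succ_eq_map, List.map_cons, List.map_map]
      refine congrArg _ (List.map_congr_left ?_)
      intro k _
      exact htail k
    rw [hmap]
    by_cases hx : x = 0
    · subst hx
      simp only [goB, ih (i + 1)]
      cases hfind : rest.find? (fun x => x != 0) with
      | none =>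
        have hhead : valF_at ts i (0 :: rest) 0
            = (PySem.List.pyGet? ts ((i : Int) - 1)).getD 0 := by
          simp [valF_at, hfind]
        simp [hfind, hhead, List.find?]
      | some v =>
        have hhead : valF_at ts i (0 :: rest) 0 = v := by
          simp [valF_at, hfind]
        simp [hfind, hhead, List.find?]
    · simp only [goB, ih (i + 1)]
      have hhead : valF_at ts i (x :: rest) 0 = x := by
        simp [valF_at, hx]
      have hb : (x != 0) = true := by simpa using hx
      simp [hx, hhead, hb]

theorem foldl_set_getElem? (f : Nat → Int → Int) (j : Nat) :
    ∀ (m k : Nat) (d : List Int),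
      ((List.range' k m).foldl (fun d i => d.set i (f i (d.getD i 0))) d)[j]?
        = if k ≤ j ∧ j < k + m ∧ j < d.length then some (f j (d.getD j 0)) else d[j]? := by
  intro m
  induction m with
  | zero => intro k d; simp [List.range']; intro h1 h2; omega
  | succ m ih =>
    intro k d
    rw [List.range'_succ, List.foldl_cons, ih (k + 1)]
    have hlen : (d.set k (f k (d.getD k 0))).length = d.length := List.length_set ..
    rw [hlen]
    by_cases hjk : j = k
    · subst hjk
      rw [if_neg (by omega)]
      by_cases hl : j < d.length
      · rw [if_pos ⟨le_refl j, by omega, hl⟩, List.getElem?_set_self' ]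
        simp [hl, List.getD_eq_getElem?_getD]
      · rw [if_neg (by omega)]
        simp [hl]
    · have hset : (d.set k (f k (d.getD k 0)))[j]? = d[j]? :=
        List.getElem?_set_ne (by omega)
      have hsetD : (d.set k (f k (d.getD k 0))).getD j 0 = d.getD j 0 := by
        rw [List.getD_eq_getElem?_getD, hset, ← List.getD_eq_getElem?_getD]
      rw [hset, hsetD]
      by_cases hc : k + 1 ≤ j ∧ j < k + 1 + m ∧ j < d.length
      · rw [if_pos hc, if_pos ⟨by omega, by omega, hc.2.2⟩]
      · rw [if_neg hc, if_neg (by omega)]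

theorem cellA_nonzero (ts : List Int) (i : Nat) (cur : Int) (j : Nat) (fuel : Nat)
    (h : cur ≠ 0) : cellA ts i cur j fuel = cur := by
  cases fuel with
  | zero => rfl
  | succ f => simp [cellA, h]

theorem cellA_hit (ts : List Int) (i j₀ : Nat)
    (hlt : i + j₀ < ts.length)
    (hnz : (PySem.List.pyGet? ts ((i + j₀ : Nat) : Int)).getD 0 ≠ 0)
    (hzero : ∀ m, m < j₀ → (PySem.List.pyGet? ts ((i + m : Nat) : Int)).getD 0 = 0) :
    ∀ (fuel j : Nat), j ≤ j₀ → j₀ - j < fuel →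
      cellA ts i 0 j fuel = (PySem.List.pyGet? ts ((i + j₀ : Nat) : Int)).getD 0 := by
  intro fuel
  induction fuel with
  | zero => intro j _ h; omega
  | succ f ih =>
    intro j hj hf
    rw [cellA]
    rw [if_pos rfl]
    by_cases hjj : j = j₀
    · subst hjj
      rw [if_pos hlt]
      exact cellA_nonzero ts i _ (j + 1) f hnz
    · have hlt' : i + j < ts.length := by omega
      rw [if_pos hlt', hzero j (by omega)]
      exact ih (j + 1) (by omega) (by omega)

theorem cellA_miss (ts : List Int) (i : Nat)
    (hzero : ∀ m, i + m < ts.length → (PySem.List.pyGet? ts ((i + m : Nat) : Int)).getD 0 = 0)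
    (hnz : (PySem.List.pyGet? ts ((i : Int) - 1)).getD 0 ≠ 0) :
    ∀ (fuel j : Nat), ts.length - i - j < fuel →
      cellA ts i 0 j fuel = (PySem.List.pyGet? ts ((i : Int) - 1)).getD 0 := by
  intro fuel
  induction fuel with
  | zero => intro j h; omega
  | succ f ih =>
    intro j hf
    rw [cellA, if_pos rfl]
    by_cases hlt : i + j < ts.length
    · rw [if_pos hlt, hzero j hlt]
      exact ih (j + 1) (by omega)
    · rw [if_neg hlt]
      exact cellA_nonzero ts i _ (j + 1) f hnz

theorem cellA_eq_valF (ts : List Int) (hpre : Pre_convert_zero ts) (i : Nat)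
    (hi : i < ts.length) :
    cellA ts i (ts.getD i 0) 0 (ts.length + 2) = valF_at ts 0 ts i := by
  have hgd : ∀ m : Nat, (PySem.List.pyGet? ts ((m : Nat) : Int)).getD 0 = ts.getD m 0 := by
    intro m; rw [PySem.List.pyGet?_natCast, List.getD_eq_getElem?_getD]
  cases hfind : (ts.drop i).find? (fun x => x != 0) with
  | some v =>
    have hf0 := hfind
    rw [List.find?_eq_some_iff_getElem] at hfind
    obtain ⟨hv, k, hk, hval, hmin⟩ := hfind
    have hvne : v ≠ 0 := by simpa using hv
    have hikv : ts[i + k]'(by simp at hk; omega) = v := by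
      rw [← List.getElem_drop (h := hk)]; exact hval
    have hikn : i + k < ts.length := by simp at hk; omega
    have hres : valF_at ts 0 ts i = v := by
      simp only [valF_at, hf0]
    rw [hres]
    by_cases hk0 : k = 0
    · subst hk0
      have : ts.getD i 0 = v := by
        rw [List.getD_eq_getElem?_getD, List.getElem?_eq_getElem (by omega)]
        simpa using hikv
      rw [this]
      exact cellA_nonzero ts i v 0 _ hvne
    · have hcur : ts.getD i 0 = 0 := by
        have h0 := hmin 0 (by omega)
        rw [List.getElem_drop] at h0
        simp at h0
        rw [List.getD_eq_getElem?_getD, List.getElem?_eq_getElem (by omega)]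
        simpa using h0
      rw [hcur]
      have hnz : (PySem.List.pyGet? ts ((i + k : Nat) : Int)).getD 0 ≠ 0 := by
        rw [hgd, List.getD_eq_getElem?_getD, List.getElem?_eq_getElem hikn]
        simpa [hikv] using hvne
      have hzero : ∀ m, m < k → (PySem.List.pyGet? ts ((i + m : Nat) : Int)).getD 0 = 0 := by
        intro m hm
        have h0 := hmin m (by omega)
        rw [List.getElem_drop] at h0
        simp at h0
        rw [hgd, List.getD_eq_getElem?_getD, List.getElem?_eq_getElem (by omega)]
        simpa using h0
      have := cellA_hit ts i k hikn hnz hzero (ts.length + 2) 0 (by omega) (by omega)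
      rw [this, hgd, List.getD_eq_getElem?_getD, List.getElem?_eq_getElem hikn]
      simpa using hikv
  | none =>
    have h0 : ∀ x ∈ ts.drop i, x = 0 := by
      intro x hx
      have := List.find?_eq_none.mp hfind x hx
      simpa using this
    have hidx : ∀ m : Nat, i + m < ts.length → ts.getD (i + m) 0 = 0 := by
      intro m hm
      have h' : m < (ts.drop i).length := by simp [List.length_drop]; omega
      have := h0 _ (List.getElem_mem h')
      rw [List.getElem_drop] at this
      rw [List.getD_eq_getElem?_getD, List.getElem?_eq_getElem hm]
      simpa using this
    have hcur : ts.getD i 0 = 0 := by simpa using hidx 0 (by omega)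
    have hlastv : ts.getD (ts.length - 1) 0 = 0 := by
      have := hidx (ts.length - 1 - i) (by omega)
      rwa [show i + (ts.length - 1 - i) = ts.length - 1 from by omega] at this
    have hlast : ts.getLast? = some 0 := by
      rw [List.getLast?_eq_getElem?, List.getElem?_eq_getElem (by omega)]
      rw [List.getD_eq_getElem?_getD, List.getElem?_eq_getElem (by omega)] at hlastv
      simpa using hlastv
    have hpre2 : 2 ≤ ts.length ∧ ts.getD (ts.length - 2) 0 ≠ 0 := by
      rcases hpre with h | h
      · exact absurd hlast h
      · exact h
    have hin1 : i = ts.length - 1 := by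
      by_contra hne
      have := hidx (ts.length - 2 - i) (by omega)
      rw [show i + (ts.length - 2 - i) = ts.length - 2 from by omega] at this
      exact hpre2.2 this
    have hnz : (PySem.List.pyGet? ts ((i : Int) - 1)).getD 0 ≠ 0 := by
      have hcast : (i : Int) - 1 = ((ts.length - 2 : Nat) : Int) := by
        subst hin1; push_cast [Nat.cast_sub (by omega : 1 ≤ ts.length)]; omega
      rw [hcast, PySem.List.pyGet?_natCast, ← List.getD_eq_getElem?_getD]
      exact hpre2.2
    have hzero : ∀ m, i + m < ts.length →
        (PySem.List.pyGet? ts ((i + m : Nat) : Int)).getD 0 = 0 := by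
      intro m hm
      rw [hgd]
      exact hidx m hm
    rw [hcur, cellA_miss ts i hzero hnz (ts.length + 2) 0 (by omega)]
    simp only [valF_at, Nat.zero_add, hfind]

-- ===== VERDICT (by name: the statement is the Claim_ definition above) =====
theorem convert_zero_spec : Claim_equal_convert_zero := by
  intro ts _ hpre
  unfold Spec_convert_zero
  unfold convert_zero convert_zero_alt
  rw [goB_eq]
  apply List.ext_getElem?
  intro j
  conv_lhs => rw [List.range_eq_range',
    foldl_set_getElem? (fun i c => cellA ts i c 0 (ts.length + 2)) j ts.length 0 ts]
  by_cases hj : j < ts.length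
  · rw [if_pos ⟨Nat.zero_le j, by omega, hj⟩]
    rw [List.getElem?_map, List.getElem?_range hj]
    simp only [Option.map_some]
    exact congrArg some (cellA_eq_valF ts hpre j hj)
  · rw [if_neg (by omega)]
    have h1 : (List.range ts.length)[j]? = none :=
      List.getElem?_eq_none_iff.mpr (by simp only [List.length_range]; omega)
    have h2 : ts[j]? = none := List.getElem?_eq_none_iff.mpr (by omega)
    rw [List.getElem?_map, h1, h2]
    rfl
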